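-- pv_equiv track=rewrite | github.com/WAVM/WAVM | Build/lib/benchmark.py | _extract_json_from_output
-- ===== SOURCE A (Python) =====
-- from typing import Optional
--
-- def _extract_json_from_output(text: str) -> Optional[str]:
--     """Extract the last JSON object from stdout.
--
--     The benchmark program's own stdout (e.g. from WASI programs) may precede
--     the JSON result. Find the last '{' ... '}' block.
--     """
--     # Find the last closing brace
--     end = text.rfind("}")
--     if end < 0:
--         return None
--     # Find the matching opening brace
--     depth = 0
--     for i in range(end, -1, -1):
--         if text[i] == "}":
--             depth += 1
--         elif text[i] == "{":
--             depth -= 1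
--         if depth == 0:
--             return text[i : end + 1]
--     return None
-- ===== SOURCE B (Python) =====
-- from typing import Optional
--
-- def _extract_json_from_output(text: str) -> Optional[str]:
--     """Extract the last JSON object from stdout (forward scan with a stack)."""
--     end = text.rfind("}")
--     if end < 0:
--         return None
--     stack = []  # indices of still-unmatched opening braces before position `end`
--     for i in range(end):
--         c = text[i]
--         if c == "{":
--             stack.append(i)
--         elif c == "}" and stack:
--             stack.pop()
--     if not stack:
--         return None
--     return text[stack[-1]: end + 1]
-- ===== Notes on version B (the rewrite author's own statement) =====
-- stated objective: alternative
-- what changed: Replaced A's backward scan with a depth counter by a single forward pass that maintains an explicit stack of the indices of still-unmatched opening braces; at the end of the scan the top of the stack is the opening brace matching the last closing brace.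
import Mathlib
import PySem

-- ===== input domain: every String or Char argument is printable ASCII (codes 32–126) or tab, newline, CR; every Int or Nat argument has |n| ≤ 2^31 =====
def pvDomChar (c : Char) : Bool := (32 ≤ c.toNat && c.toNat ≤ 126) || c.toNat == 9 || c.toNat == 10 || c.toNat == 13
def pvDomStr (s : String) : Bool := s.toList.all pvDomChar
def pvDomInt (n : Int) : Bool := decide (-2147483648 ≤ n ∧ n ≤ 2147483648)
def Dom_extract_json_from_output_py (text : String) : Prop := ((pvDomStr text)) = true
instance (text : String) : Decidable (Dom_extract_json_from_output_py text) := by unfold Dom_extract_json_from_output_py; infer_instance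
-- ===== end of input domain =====

-- B replaces A's backward depth-counter scan by a forward pass with an explicit
-- stack of the indices of unmatched opening braces (alternative algorithm, same O(n) cost).

-- ===== PORT A =====
-- the 'for i in range(end, -1, -1)' loop of A, recursing downward on i;
-- depth is the running counter, i the current index.
def pvAGo (text : String) (cs : List Char) (e : Nat) : Nat → Int → Option String
  | 0, depth =>
    let c := PySem.List.pyGetD cs ((0 : Nat) : Int) ' '
    let depth' := if c == '}' then depth + 1 else if c == '{' then depth - 1 else depth
    if depth' == 0 then some (PySem.Str.slice text (some ((0 : Nat) : Int)) (some ((e : Int) + 1)))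
    else none
  | j + 1, depth =>
    let c := PySem.List.pyGetD cs ((j + 1 : Nat) : Int) ' '
    let depth' := if c == '}' then depth + 1 else if c == '{' then depth - 1 else depth
    if depth' == 0 then some (PySem.Str.slice text (some ((j + 1 : Nat) : Int)) (some ((e : Int) + 1)))
    else pvAGo text cs e j depth'

def extract_json_from_output_py (text : String) : Option String :=
  let e := PySem.Str.rfind text "}"
  if e < 0 then none
  else pvAGo text text.toList e.toNat e.toNat 0

-- ===== PORT B =====
def extract_json_from_output_py_alt (text : String) : Option String :=
  let e := PySem.Str.rfind text "}"
  if e < 0 then none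
  else
    let cs := text.toList
    let stack := (PySem.List.pyRange 0 e 1).foldl (fun st i =>
      let c := PySem.List.pyGetD cs i ' '
      if c == '{' then i.toNat :: st
      else if c == '}' && !st.isEmpty then st.tail
      else st) []
    match stack with
    | [] => none
    | b :: _ => some (PySem.Str.slice text (some ((b : Nat) : Int)) (some (e + 1)))

-- ===== PRECONDITION & SPEC =====
def Spec_extract_json_from_output_py (text : String) (out : Option String) : Prop := out = extract_json_from_output_py_alt text
instance (text : String) (out : Option String) : Decidable (Spec_extract_json_from_output_py text out) := by unfold Spec_extract_json_from_output_py; infer_instance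

-- ===== CLAIM (what is proved, stated in full; the proofs are below) =====
def Claim_equal_extract_json_from_output_py : Prop := ∀ (text : String), Dom_extract_json_from_output_py text → Spec_extract_json_from_output_py text (extract_json_from_output_py text)

-- ===== LEMMAS AND PROOFS =====

def pvW (c : Char) : Int := if c = '{' then 1 else if c = '}' then -1 else 0
def pvS (cs : List Char) (k : Nat) : Int := ((cs.take k).map pvW).sum
def pvM (cs : List Char) (e : Nat) : Nat → Option Nat
  | 0 => if pvS cs 0 = pvS cs (e + 1) then some 0 else none
  | j + 1 => if pvS cs (j + 1) = pvS cs (e + 1) then some (j + 1) else pvM cs e j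
def pvInv (cs : List Char) : Nat → List Nat → Prop
  | i, [] => ∀ j ≤ i, pvS cs i ≤ pvS cs j
  | i, b :: st => cs.getD b ' ' = '{' ∧ b < i ∧ pvS cs i = pvS cs (b + 1) ∧
      (∀ k, b + 1 ≤ k → k ≤ i → pvS cs (b + 1) ≤ pvS cs k) ∧ pvInv cs b st

theorem pvS_succ (cs : List Char) (k : Nat) (hk : k < cs.length) :
    pvS cs (k + 1) = pvS cs k + pvW (cs.getD k ' ') := by
  unfold pvS
  simp [List.getD_eq_getElem?_getD, List.getElem?_eq_getElem hk,
    List.sum_take_succ (cs.map pvW) k (by simpa)]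

theorem pvM_eq_none (cs : List Char) (e : Nat) (i : Nat)
    (hk : ∀ k, k ≤ i → pvS cs k ≠ pvS cs (e + 1)) :
    pvM cs e i = none := by
  induction i with
  | zero => simp [pvM, hk 0 (by omega)]
  | succ j ih =>
    simp only [pvM, if_neg (hk (j + 1) le_rfl)]
    exact ih fun k hkj => hk k (by omega)

theorem pvM_eq_some (cs : List Char) (e : Nat) (b : Nat) (i : Nat) (hbi : b ≤ i)
    (hb : pvS cs b = pvS cs (e + 1))
    (hk : ∀ k, b < k → k ≤ i → pvS cs k ≠ pvS cs (e + 1)) :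
    pvM cs e i = some b := by
  induction i with
  | zero =>
    have : b = 0 := by omega
    subst this; simp [pvM, hb]
  | succ j ih =>
    by_cases hbj : b = j + 1
    · subst hbj; simp [pvM, hb]
    · have h1 : pvS cs (j + 1) ≠ pvS cs (e + 1) := hk (j + 1) (by omega) le_rfl
      simp only [pvM, if_neg h1]
      exact ih (by omega) fun k h2 h3 => hk k h2 (by omega)

theorem pvInv_step (cs : List Char) (i : Nat) (hi : i < cs.length) (st : List Nat)
    (h : pvInv cs i st) :
    pvInv cs (i + 1)
      (if cs.getD i ' ' == '{' then i :: st
       else if cs.getD i ' ' == '}' && !st.isEmpty then st.tail else st) := by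
  have hS := pvS_succ cs i hi
  set c := cs.getD i ' ' with hc
  have hWo : pvW '{' = 1 := by decide
  have hWc : pvW '}' = -1 := by decide
  by_cases h1 : c = '{'
  · -- push
    simp only [h1, beq_self_eq_true, if_true]
    refine ⟨h1, by omega, by rw [hS, h1, hWo], ?_, h⟩
    intro k hk1 hk2
    have : k = i + 1 := by omega
    subst this; exact le_rfl
  · have hW0 : c ≠ '{' := h1
    by_cases h2 : c = '}'
    · -- pop / ignore
      have hSi : pvS cs (i + 1) = pvS cs i - 1 := by rw [hS, h2, hWc]; ring
      cases st with
      | nil =>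
        have hstack : (if (c == '{') = true then i :: ([] : List Nat)
            else if (c == '}' && !List.isEmpty ([] : List Nat)) = true then List.tail ([] : List Nat) else []) = [] := by
          simp [h1]
        rw [hstack]
        intro j hj
        rcases Nat.lt_or_ge j (i + 1) with hlt | hge
        · have := h j (by omega); omega
        · have : j = i + 1 := by omega
          subst this; exact le_rfl
      | cons b rest =>
        have hstack : (if (c == '{') = true then i :: b :: rest
            else if (c == '}' && !List.isEmpty (b :: rest)) = true then List.tail (b :: rest)
            else b :: rest) = rest := by
          simp [h2]
        rw [hstack]
        obtain ⟨hb, hbi, hSb, hNN, hrest⟩ := h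
        have hblen : b < cs.length := by omega
        have hSb1 : pvS cs (b + 1) = pvS cs b + 1 := by rw [pvS_succ cs b hblen, hb, hWo]
        cases rest with
        | nil =>
          -- stack empties
          intro j hj
          rcases Nat.lt_or_ge j (b + 1) with hlt | hge
          · have := hrest j (by omega); omega
          · rcases Nat.lt_or_ge j (i + 1) with hlt2 | hge2
            · have := hNN j (by omega) (by omega); omega
            · have : j = i + 1 := by omega
              subst this; exact le_rfl
        | cons b2 r2 =>
          obtain ⟨hb2, hb2b, hSb2, hNN2, hr⟩ := hrest
          refine ⟨hb2, by omega, by omega, ?_, hr⟩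
          intro k hk1 hk2
          rcases Nat.lt_or_ge k (b + 1) with hlt | hge
          · exact hNN2 k hk1 (by omega)
          · rcases Nat.lt_or_ge k (i + 1) with hlt2 | hge2
            · have := hNN k (by omega) (by omega); omega
            · have : k = i + 1 := by omega
              subst this; omega
    · -- other char
      have hSi : pvS cs (i + 1) = pvS cs i := by
        rw [hS]; simp only [pvW, if_neg h1, if_neg h2]; ring
      have hstack : ∀ st0 : List Nat, (if (c == '{') = true then i :: st0
          else if (c == '}' && !List.isEmpty st0) = true then List.tail st0 else st0) = st0 := by
        intro st0; simp [h1, h2]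
      rw [hstack]
      cases st with
      | nil =>
        intro j hj
        rcases Nat.lt_or_ge j (i + 1) with hlt | hge
        · have := h j (by omega); omega
        · have : j = i + 1 := by omega
          subst this; exact le_rfl
      | cons b rest =>
        obtain ⟨hb, hbi, hSb, hNN, hrest⟩ := h
        refine ⟨hb, by omega, by omega, ?_, hrest⟩
        intro k hk1 hk2
        rcases Nat.lt_or_ge k (i + 1) with hlt | hge
        · exact hNN k hk1 (by omega)
        · have : k = i + 1 := by omega
          subst this; omega

theorem pvInv_fold (cs : List Char) (e : Nat) (he : e ≤ cs.length) :
    pvInv cs e ((List.range e).foldl (fun st j =>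
      if cs.getD j ' ' == '{' then j :: st
      else if cs.getD j ' ' == '}' && !st.isEmpty then st.tail else st) []) := by
  induction e with
  | zero => intro j hj; interval_cases j; exact le_rfl
  | succ n ih =>
    rw [List.range_succ, List.foldl_append, List.foldl_cons, List.foldl_nil]
    exact pvInv_step cs n (by omega) _ (ih (by omega))

theorem pv_prefix_rbrace (l : List Char) :
    (['}'].isPrefixOf l = true) ↔ l.head? = some '}' := by
  cases l with
  | nil => simp
  | cons a t => simp only [List.isPrefixOf, List.head?_cons, Option.some.injEq, Bool.and_eq_true, beq_iff_eq, List.isPrefixOf_nil_left, and_true]; exact eq_comm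

theorem pv_rfind_go_spec (cs : List Char) (k : Nat) (hk : k ≤ cs.length)
    (h0 : 0 ≤ PySem.Chars.rfind.go cs ['}'] k) :
    (PySem.Chars.rfind.go cs ['}'] k).toNat < cs.length ∧
      cs.getD (PySem.Chars.rfind.go cs ['}'] k).toNat ' ' = '}' := by
  induction k with
  | zero =>
    by_cases hp : ['}'].isPrefixOf cs = true
    · have hh := (pv_prefix_rbrace cs).mp hp
      have hcs : cs[0]? = some '}' := by cases cs <;> simp_all
      have hlen : 0 < cs.length := by cases cs <;> simp_all
      constructor
      · simp [PySem.Chars.rfind.go, hp]; omega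
      · simp [PySem.Chars.rfind.go, hp, List.getD_eq_getElem?_getD, hcs]
    · simp [PySem.Chars.rfind.go, hp] at h0
  | succ j ih =>
    by_cases hp : ['}'].isPrefixOf (cs.drop (j + 1)) = true
    · have hh := (pv_prefix_rbrace _).mp hp
      rw [List.head?_drop] at hh
      have hlen : j + 1 < cs.length := (List.getElem?_eq_some_iff.mp hh).1
      constructor
      · simp [PySem.Chars.rfind.go, hp]; omega
      · simp [PySem.Chars.rfind.go, hp, List.getD_eq_getElem?_getD, hh]
    · have hgo : PySem.Chars.rfind.go cs ['}'] (j + 1) = PySem.Chars.rfind.go cs ['}'] j := by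
        simp [PySem.Chars.rfind.go, hp]
      rw [hgo] at h0 ⊢
      exact ih (by omega) h0

theorem pv_rfind_spec (cs : List Char) (h0 : 0 ≤ PySem.Chars.rfind cs ['}']) :
    (PySem.Chars.rfind cs ['}']).toNat < cs.length ∧
      cs.getD (PySem.Chars.rfind cs ['}']).toNat ' ' = '}' := by
  unfold PySem.Chars.rfind at h0 ⊢
  exact pv_rfind_go_spec cs cs.length le_rfl h0

theorem pv_depth_step (cs : List Char) (e i : Nat) (hi : i < cs.length) :
    (if PySem.List.pyGetD cs (i : Int) ' ' == '}' then (pvS cs (i + 1) - pvS cs (e + 1)) + 1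
     else if PySem.List.pyGetD cs (i : Int) ' ' == '{' then (pvS cs (i + 1) - pvS cs (e + 1)) - 1
     else pvS cs (i + 1) - pvS cs (e + 1)) = pvS cs i - pvS cs (e + 1) := by
  have hS := pvS_succ cs i hi
  rw [PySem.List.pyGetD_natCast]
  set c := cs.getD i ' ' with hc
  by_cases h2 : c = '}'
  · rw [h2] at hS ⊢
    rw [show pvW '}' = -1 from by decide] at hS
    simp only [beq_self_eq_true, if_true]; omega
  · by_cases h1 : c = '{'
    · rw [h1] at hS ⊢
      rw [show pvW '{' = 1 from by decide] at hS
      rw [if_neg (by simp), if_pos (by simp)]; omega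
    · rw [if_neg (by simpa using h2), if_neg (by simpa using h1)]
      simp only [pvW, if_neg h1, if_neg h2] at hS; omega

theorem pvAGo_spec (text : String) (e : Nat) (he : e < text.toList.length) :
    ∀ i, i ≤ e → pvAGo text text.toList e i (pvS text.toList (i + 1) - pvS text.toList (e + 1)) =
      (pvM text.toList e i).map
        (fun j => PySem.Str.slice text (some (j : Int)) (some ((e : Int) + 1))) := by
  intro i
  induction i with
  | zero =>
    intro _
    simp only [pvAGo]
    rw [pv_depth_step text.toList e 0 (by omega)]
    by_cases h : pvS text.toList 0 = pvS text.toList (e + 1)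
    · simp [pvM, h]
    · simp [pvM, h, sub_eq_zero]
  | succ j ih =>
    intro hie
    simp only [pvAGo]
    rw [pv_depth_step text.toList e (j + 1) (by omega)]
    by_cases h : pvS text.toList (j + 1) = pvS text.toList (e + 1)
    · simp [pvM, h]
    · have hne : ((pvS text.toList (j + 1) - pvS text.toList (e + 1)) == 0) = false := by
        simp [sub_eq_zero, h]
      rw [if_neg (by simp [hne, sub_eq_zero, h])]
      have := ih (by omega)
      simp only [pvM, if_neg h]
      exact this

theorem pv_main (text : String) :
    extract_json_from_output_py text = extract_json_from_output_py_alt text := by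
  have hE : PySem.Str.rfind text "}" = PySem.Chars.rfind text.toList ['}'] := by
    rw [PySem.Str.rfind_eq]
    rfl
  simp only [extract_json_from_output_py, extract_json_from_output_py_alt, hE]
  by_cases hneg : PySem.Chars.rfind text.toList ['}'] < 0
  · rw [if_pos hneg, if_pos hneg]
  · rw [if_neg hneg, if_neg hneg]
    have h0 : 0 ≤ PySem.Chars.rfind text.toList ['}'] := by omega
    obtain ⟨hlen, hch⟩ := pv_rfind_spec text.toList h0
    set cs := text.toList with hcs
    set e' := (PySem.Chars.rfind cs ['}']).toNat with he'
    have hcast : ((e' : Int)) = PySem.Chars.rfind cs ['}'] := Int.toNat_of_nonneg h0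
    -- A side
    have hA := pvAGo_spec text e' hlen e' le_rfl
    rw [sub_self] at hA
    -- B side: the foldl over pyRange is the Nat-range foldl of the invariant lemma
    have hfold : ((PySem.List.pyRange 0 (PySem.Chars.rfind cs ['}']) 1).foldl (fun st i =>
        if PySem.List.pyGetD cs i ' ' == '{' then i.toNat :: st
        else if PySem.List.pyGetD cs i ' ' == '}' && !st.isEmpty then st.tail
        else st) []) = ((List.range e').foldl (fun st j =>
          if cs.getD j ' ' == '{' then j :: st
          else if cs.getD j ' ' == '}' && !st.isEmpty then st.tail else st) []) := by
      rw [← hcast, PySem.List.pyRange_zero_natCast, List.foldl_map]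
      simp only [PySem.List.pyGetD_natCast, Int.toNat_natCast]
    have hInv := pvInv_fold cs e' (le_of_lt hlen)
    have hS1 : pvS cs (e' + 1) = pvS cs e' - 1 := by
      rw [pvS_succ cs e' hlen, hch, show pvW '}' = -1 from by decide]; ring
    rw [hA, hfold]
    cases hst : (List.range e').foldl (fun st j =>
          if cs.getD j ' ' == '{' then j :: st
          else if cs.getD j ' ' == '}' && !st.isEmpty then st.tail else st) [] with
    | nil =>
      rw [hst] at hInv
      have hnone : pvM cs e' e' = none := by
        apply pvM_eq_none
        intro k hk
        have := hInv k hk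
        omega
      rw [hnone]; rfl
    | cons b rest =>
      rw [hst] at hInv
      obtain ⟨hb, hbi, hSb, hNN, _⟩ := hInv
      have hb1 : pvS cs (b + 1) = pvS cs b + 1 := by
        rw [pvS_succ cs b (by omega), hb, show pvW '{' = 1 from by decide]
      have hsome : pvM cs e' e' = some b := by
        apply pvM_eq_some cs e' b e' (by omega)
        · omega
        · intro k h2 h3
          have := hNN k (by omega) h3
          omega
      rw [hsome]
      simp [hcast]

theorem extract_json_from_output_py_spec : Claim_equal_extract_json_from_output_py := by
  intro text _
  unfold Spec_extract_json_from_output_py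
  exact pv_main text
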